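-- pv_equiv track=rewrite | github.com/pypi-data/pypi-mirror-138 | packages/move-jismeshcode/move_jismeshcode-0.0.5.tar.gz/move_jismeshcode-0.0.5/move_jismeshcode/sub.py | _extractX
-- ===== SOURCE A (Python) =====
-- from typing import Tuple, Union, List
--
-- def _extractX(ls1: List[int]) -> int:
--     x = ''
--     for i in range(0, len(ls1)):
--       if i >= 8:
--         x += str(ls1[i])
--       elif i in [2,3,5,7]:
--         x += str(ls1[i])
--     return int(x)
-- ===== SOURCE B (Python) =====
-- def _extractX(ls1):
--     rest = list(ls1)
--     for i in (6, 4, 1, 0):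
--         if i < len(rest):
--             del rest[i]
--     return int(''.join(map(str, rest)))
-- ===== Notes on version B (the rewrite author's own statement) =====
-- stated objective: simpler
-- what changed: B operates on the complement: it deletes the unselected positions 0,1,4,6 (descending, guarded by the current length) from a copy of the list and joins the string forms of everything that remains, instead of A's scan of every index 0..len-1 with an if/elif chain growing a string character-group by character-group.
import Mathlib
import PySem

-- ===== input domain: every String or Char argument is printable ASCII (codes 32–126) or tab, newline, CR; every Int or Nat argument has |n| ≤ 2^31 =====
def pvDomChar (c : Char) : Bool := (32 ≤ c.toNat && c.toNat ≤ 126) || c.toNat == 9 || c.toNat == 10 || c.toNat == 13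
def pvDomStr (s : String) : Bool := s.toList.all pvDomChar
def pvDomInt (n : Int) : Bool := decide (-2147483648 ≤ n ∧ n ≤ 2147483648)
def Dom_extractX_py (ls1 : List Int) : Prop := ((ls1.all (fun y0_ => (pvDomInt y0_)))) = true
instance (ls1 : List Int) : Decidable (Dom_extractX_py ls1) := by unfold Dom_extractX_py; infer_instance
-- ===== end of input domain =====

-- B works on the complement: it deletes the unselected positions 0,1,4,6 from a copy of the
-- list and joins the string forms of what remains, instead of A's scan of every index with an
-- if/elif chain growing a string (objective: simpler).

-- ===== PORT A =====
-- x += str(ls1[i]): indices come from range(0, len(ls1)), so they are in range and pyGetD is exact.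
def extractX_py (ls1 : List Int) : Int :=
  let x := (PySem.List.pyRange 0 (PySem.List.len ls1)).foldl
    (fun x i =>
      if 8 ≤ i then x ++ PySem.Int.toStr (PySem.List.pyGetD ls1 i 0)
      else if i ∈ ([2, 3, 5, 7] : List Int) then x ++ PySem.Int.toStr (PySem.List.pyGetD ls1 i 0)
      else x) ""
  -- int(x): raises ValueError on an invalid literal; those inputs are excluded by Pre_
  (PySem.Int.ofStr? x).getD 0

-- ===== PORT B =====
-- for i in (6,4,1,0): if i < len(rest): del rest[i]
-- del rest[i] with a nonnegative in-range i is List.eraseIdx i.toNat (exact here: i is a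
-- literal from (6,4,1,0) and the guard i < len(rest) makes it in range).
def extractX_py_alt (ls1 : List Int) : Int :=
  let rest := ([6, 4, 1, 0] : List Int).foldl
    (fun rest i => if i < PySem.List.len rest then rest.eraseIdx i.toNat else rest) ls1
  -- int(''.join(map(str, rest))): ValueError inputs are excluded by Pre_
  (PySem.Int.ofStr? (PySem.Str.join "" (rest.map PySem.Int.toStr))).getD 0

-- ===== PRECONDITION & SPEC =====
-- Pre_ holds exactly when the Python A returns: the first selected element must exist (index 2)
-- and every later selected element (indices 3, 5, 7 and the tail from 8) must be nonnegative,
-- otherwise int() raises ValueError on the concatenated string (e.g. int('') or int('5-1')).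
def Pre_extractX_py (ls1 : List Int) : Prop :=
  3 ≤ ls1.length ∧ (4 ≤ ls1.length → 0 ≤ ls1.getD 3 0) ∧ (6 ≤ ls1.length → 0 ≤ ls1.getD 5 0) ∧
    (8 ≤ ls1.length → 0 ≤ ls1.getD 7 0) ∧ (∀ x ∈ ls1.drop 8, 0 ≤ x)
instance (ls1 : List Int) : Decidable (Pre_extractX_py ls1) := by unfold Pre_extractX_py; infer_instance
def pvWitness_extractX_py : List Int := [0, 0, 12]
def Spec_extractX_py (ls1 : List Int) (out : Int) : Prop := out = extractX_py_alt ls1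
instance (ls1 : List Int) (out : Int) : Decidable (Spec_extractX_py ls1 out) := by unfold Spec_extractX_py; infer_instance

-- ===== CLAIM (what is proved, stated in full; the proofs are below) =====
def Claim_equal_extractX_py : Prop := ∀ (ls1 : List Int), Dom_extractX_py ls1 → Pre_extractX_py ls1 → Spec_extractX_py ls1 (extractX_py ls1)

-- ===== LEMMAS AND PROOFS =====
lemma pv_join_nil_flatten (parts : List (List Char)) : PySem.Chars.join [] parts = parts.flatten := by
  induction parts with
  | nil => simp [PySem.Chars.join_nil]
  | cons a t ih =>
    cases t with
    | nil => simp [PySem.Chars.join_singleton]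
    | cons b u => simp [PySem.Chars.join_cons_cons] at *; simpa using ih

lemma pv_foldl_append_toStr (L : List Int) (s : String) :
    (L.foldl (fun x v => x ++ PySem.Int.toStr v) s).toList
      = s.toList ++ (L.map PySem.Int.toChars).flatten := by
  induction L generalizing s with
  | nil => simp
  | cons a t ih => simp [List.foldl_cons, ih, String.toList_append, PySem.Int.toList_toStr]

lemma pv_tail_fold (ls1 : List Int) (s : String) :
    (PySem.List.pyRange 8 (PySem.List.len ls1)).foldl
      (fun x i =>
        if 8 ≤ i then x ++ PySem.Int.toStr (PySem.List.pyGetD ls1 i 0)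
        else if i ∈ ([2, 3, 5, 7] : List Int) then x ++ PySem.Int.toStr (PySem.List.pyGetD ls1 i 0)
        else x) s
      = (ls1.drop 8).foldl (fun x v => x ++ PySem.Int.toStr v) s := by
  rw [PySem.List.foldl_congr_mem _ _
      (fun x i => x ++ PySem.Int.toStr (PySem.List.pyGetD ls1 i 0)) s ?_]
  · exact PySem.List.foldl_pyRange_pyGetD ls1 0 (fun x v => x ++ PySem.Int.toStr v) s (by norm_num)
  · intro acc i hi
    rw [PySem.List.mem_pyRange_one] at hi
    simp [hi.1]

-- B's deletion of positions 6,4,1,0 leaves exactly A's selected elements: 2,3,5,7 and the tail from 8.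
lemma pv_rest_eq (ls1 : List Int) :
    ([6, 4, 1, 0] : List Int).foldl
      (fun rest i => if i < PySem.List.len rest then rest.eraseIdx i.toNat else rest) ls1
    = ((([2, 3, 5, 7] : List Int).filter (fun i => decide (i < PySem.List.len ls1))).map
        (fun i => PySem.List.pyGetD ls1 i 0))
      ++ PySem.List.slice ls1 (some 8) none := by
  rw [show PySem.List.slice ls1 (some 8) none = ls1.drop 8 from by
    simpa using PySem.List.slice_from_natCast ls1 8]
  match ls1 with
  | [] => decide
  | [a0] =>
      norm_num [PySem.List.len_eq, List.foldl, List.eraseIdx, PySem.List.pyGetD_of_nonneg,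
        show Int.toNat 0 = 0 from rfl, show Int.toNat 1 = 1 from rfl, show Int.toNat 2 = 2 from rfl,
        show Int.toNat 3 = 3 from rfl, show Int.toNat 4 = 4 from rfl, show Int.toNat 5 = 5 from rfl,
        show Int.toNat 6 = 6 from rfl, show Int.toNat 7 = 7 from rfl]
  | [a0, a1] =>
      norm_num [PySem.List.len_eq, List.foldl, List.eraseIdx, PySem.List.pyGetD_of_nonneg,
        show Int.toNat 0 = 0 from rfl, show Int.toNat 1 = 1 from rfl, show Int.toNat 2 = 2 from rfl,
        show Int.toNat 3 = 3 from rfl, show Int.toNat 4 = 4 from rfl, show Int.toNat 5 = 5 from rfl,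
        show Int.toNat 6 = 6 from rfl, show Int.toNat 7 = 7 from rfl]
  | [a0, a1, a2] =>
      norm_num [PySem.List.len_eq, List.foldl, List.eraseIdx, PySem.List.pyGetD_of_nonneg,
        show Int.toNat 0 = 0 from rfl, show Int.toNat 1 = 1 from rfl, show Int.toNat 2 = 2 from rfl,
        show Int.toNat 3 = 3 from rfl, show Int.toNat 4 = 4 from rfl, show Int.toNat 5 = 5 from rfl,
        show Int.toNat 6 = 6 from rfl, show Int.toNat 7 = 7 from rfl]
  | [a0, a1, a2, a3] =>
      norm_num [PySem.List.len_eq, List.foldl, List.eraseIdx, PySem.List.pyGetD_of_nonneg,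
        show Int.toNat 0 = 0 from rfl, show Int.toNat 1 = 1 from rfl, show Int.toNat 2 = 2 from rfl,
        show Int.toNat 3 = 3 from rfl, show Int.toNat 4 = 4 from rfl, show Int.toNat 5 = 5 from rfl,
        show Int.toNat 6 = 6 from rfl, show Int.toNat 7 = 7 from rfl]
  | [a0, a1, a2, a3, a4] =>
      norm_num [PySem.List.len_eq, List.foldl, List.eraseIdx, PySem.List.pyGetD_of_nonneg,
        show Int.toNat 0 = 0 from rfl, show Int.toNat 1 = 1 from rfl, show Int.toNat 2 = 2 from rfl,
        show Int.toNat 3 = 3 from rfl, show Int.toNat 4 = 4 from rfl, show Int.toNat 5 = 5 from rfl,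
        show Int.toNat 6 = 6 from rfl, show Int.toNat 7 = 7 from rfl]
  | [a0, a1, a2, a3, a4, a5] =>
      norm_num [PySem.List.len_eq, List.foldl, List.eraseIdx, PySem.List.pyGetD_of_nonneg,
        show Int.toNat 0 = 0 from rfl, show Int.toNat 1 = 1 from rfl, show Int.toNat 2 = 2 from rfl,
        show Int.toNat 3 = 3 from rfl, show Int.toNat 4 = 4 from rfl, show Int.toNat 5 = 5 from rfl,
        show Int.toNat 6 = 6 from rfl, show Int.toNat 7 = 7 from rfl]
  | [a0, a1, a2, a3, a4, a5, a6] =>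
      norm_num [PySem.List.len_eq, List.foldl, List.eraseIdx, PySem.List.pyGetD_of_nonneg,
        show Int.toNat 0 = 0 from rfl, show Int.toNat 1 = 1 from rfl, show Int.toNat 2 = 2 from rfl,
        show Int.toNat 3 = 3 from rfl, show Int.toNat 4 = 4 from rfl, show Int.toNat 5 = 5 from rfl,
        show Int.toNat 6 = 6 from rfl, show Int.toNat 7 = 7 from rfl]
  | a0 :: a1 :: a2 :: a3 :: a4 :: a5 :: a6 :: a7 :: rest =>
      simp only [List.foldl_cons, List.foldl_nil]
      rw [if_pos (by simp [PySem.List.len_eq]; omega :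
        (6:Int) < PySem.List.len (a0::a1::a2::a3::a4::a5::a6::a7::rest))]
      rw [show (a0::a1::a2::a3::a4::a5::a6::a7::rest).eraseIdx (6:Int).toNat
            = a0::a1::a2::a3::a4::a5::a7::rest from rfl]
      rw [if_pos (by simp [PySem.List.len_eq]; omega :
        (4:Int) < PySem.List.len (a0::a1::a2::a3::a4::a5::a7::rest))]
      rw [show (a0::a1::a2::a3::a4::a5::a7::rest).eraseIdx (4:Int).toNat
            = a0::a1::a2::a3::a5::a7::rest from rfl]
      rw [if_pos (by simp [PySem.List.len_eq]; omega :
        (1:Int) < PySem.List.len (a0::a1::a2::a3::a5::a7::rest))]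
      rw [show (a0::a1::a2::a3::a5::a7::rest).eraseIdx (1:Int).toNat
            = a0::a2::a3::a5::a7::rest from rfl]
      rw [if_pos (by simp [PySem.List.len_eq]; omega :
        (0:Int) < PySem.List.len (a0::a2::a3::a5::a7::rest))]
      rw [show (a0::a2::a3::a5::a7::rest).eraseIdx (0:Int).toNat
            = a2::a3::a5::a7::rest from rfl]
      rw [List.filter_eq_self.mpr (by intro a ha; fin_cases ha <;> (simp [PySem.List.len_eq]; omega))]
      norm_num [PySem.List.pyGetD_of_nonneg, show Int.toNat 2 = 2 from rfl,
        show Int.toNat 3 = 3 from rfl, show Int.toNat 5 = 5 from rfl, show Int.toNat 7 = 7 from rfl]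

lemma pv_str_eq (ls1 : List Int) :
    ((PySem.List.pyRange 0 (PySem.List.len ls1)).foldl
      (fun x i =>
        if 8 ≤ i then x ++ PySem.Int.toStr (PySem.List.pyGetD ls1 i 0)
        else if i ∈ ([2, 3, 5, 7] : List Int) then x ++ PySem.Int.toStr (PySem.List.pyGetD ls1 i 0)
        else x) "").toList
    = (PySem.Str.join ""
        ((((([2, 3, 5, 7] : List Int).filter (fun i => decide (i < PySem.List.len ls1))).map
            (fun i => PySem.List.pyGetD ls1 i 0))
          ++ PySem.List.slice ls1 (some 8) none).map PySem.Int.toStr)).toList := by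
  rw [PySem.Str.toList_join]
  simp only [List.map_map, Function.comp_def, PySem.Int.toList_toStr]
  rw [show ("" : String).toList = [] from rfl, pv_join_nil_flatten]
  rw [show PySem.List.slice ls1 (some 8) none = ls1.drop 8 from by
    simpa using PySem.List.slice_from_natCast ls1 8]
  match ls1 with
  | [] =>
      rw [show PySem.List.len ([] : List Int) = 0 from by simp [PySem.List.len]]
      rw [show PySem.List.pyRange 0 0 = [] from by decide]
      simp
  | [a0] =>
      rw [show PySem.List.len [a0] = 1 from by simp [PySem.List.len]]
      rw [show PySem.List.pyRange 0 1 = [0] from by decide]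
      norm_num [PySem.List.pyGetD_of_nonneg]
  | [a0, a1] =>
      rw [show PySem.List.len [a0, a1] = 2 from by simp [PySem.List.len]]
      rw [show PySem.List.pyRange 0 2 = [0, 1] from by decide]
      norm_num [PySem.List.pyGetD_of_nonneg]
  | [a0, a1, a2] =>
      rw [show PySem.List.len [a0, a1, a2] = 3 from by simp [PySem.List.len]]
      rw [show PySem.List.pyRange 0 3 = [0, 1, 2] from by decide]
      norm_num [PySem.List.pyGetD_of_nonneg, String.toList_append, PySem.Int.toList_toStr]
  | [a0, a1, a2, a3] =>
      rw [show PySem.List.len [a0, a1, a2, a3] = 4 from by simp [PySem.List.len]]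
      rw [show PySem.List.pyRange 0 4 = [0, 1, 2, 3] from by decide]
      norm_num [PySem.List.pyGetD_of_nonneg, String.toList_append, PySem.Int.toList_toStr]
  | [a0, a1, a2, a3, a4] =>
      rw [show PySem.List.len [a0, a1, a2, a3, a4] = 5 from by simp [PySem.List.len]]
      rw [show PySem.List.pyRange 0 5 = [0, 1, 2, 3, 4] from by decide]
      norm_num [PySem.List.pyGetD_of_nonneg, String.toList_append, PySem.Int.toList_toStr]
  | [a0, a1, a2, a3, a4, a5] =>
      rw [show PySem.List.len [a0, a1, a2, a3, a4, a5] = 6 from by simp [PySem.List.len]]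
      rw [show PySem.List.pyRange 0 6 = [0, 1, 2, 3, 4, 5] from by decide]
      norm_num [PySem.List.pyGetD_of_nonneg, String.toList_append, PySem.Int.toList_toStr]
  | [a0, a1, a2, a3, a4, a5, a6] =>
      rw [show PySem.List.len [a0, a1, a2, a3, a4, a5, a6] = 7 from by simp [PySem.List.len]]
      rw [show PySem.List.pyRange 0 7 = [0, 1, 2, 3, 4, 5, 6] from by decide]
      norm_num [PySem.List.pyGetD_of_nonneg, String.toList_append, PySem.Int.toList_toStr]
  | a0 :: a1 :: a2 :: a3 :: a4 :: a5 :: a6 :: a7 :: rest =>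
      rw [PySem.List.pyRange_one_append 0 8 (PySem.List.len (a0::a1::a2::a3::a4::a5::a6::a7::rest))
        (by norm_num) (by simp [PySem.List.len]; omega)]
      rw [List.foldl_append, pv_tail_fold, pv_foldl_append_toStr]
      rw [show PySem.List.pyRange 0 8 = [0, 1, 2, 3, 4, 5, 6, 7] from by decide]
      rw [List.filter_eq_self.mpr (by intro a ha; fin_cases ha <;> (simp [PySem.List.len]; omega))]
      norm_num [PySem.List.pyGetD_of_nonneg, String.toList_append, PySem.Int.toList_toStr]

theorem pv_main (ls1 : List Int) : extractX_py ls1 = extractX_py_alt ls1 := by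
  unfold extractX_py extractX_py_alt
  simp only [PySem.Int.ofStr?, pv_rest_eq]
  rw [pv_str_eq ls1]

-- ===== VERDICT (by name: the statement is the Claim_ definition above) =====
theorem extractX_py_spec : Claim_equal_extractX_py := by
  intro ls1 _ _
  exact pv_main ls1
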